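-- pv_equiv track=rewrite | github.com/todddeluca/reciprocal_smallest_distance | rsd/fasta.py | _splitOnNamelines
-- ===== SOURCE A (Python) =====
-- def _splitOnNamelines(filehandle, filterBlankLines=False):
--     '''
--     Split the lines in filehandle on namelines.  Example nameline: '>lcl|12345'
--     Yields a seq of lines, where the first line is a nameline (except if filehandle starts with a non-nameline) and the other lines are lines until the next nameline
--     or the end of the file.  Lines include newlines.  The seq of lines will always contain at least one line.  Only the first line will ever be a nameline.
--
--     filterBlankLines: if True, no blank lines (lines only containing whitespace) will be yielded.
--
--
--         >sp|P27348|1433T_HUMAN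
--         MEKTELIQKAKLAEQAERYDDMATCMKAVTEQGAELSNEERNLLSVAYKNVVGGRRSAWR
--         EGAEN
--
--         >sp|P63104|1433Z_HUMAN
--         MDKNELVQKAKLAEQAERYDDMAACMKSVTEQGAELSNEERNLLSVAYKNVVGARRSSWR
--         MKGDYYRYLAEVAAGDDKKGIVDQSQQAYQEAFEISKKEMQPTHPIRLGLALNFSVFYYE
--     '''
--     lines = []
--     for line in filehandle:
--         if line and line[0] == '>': # a nameline
--             if lines:
--                 yield lines # yield current sequence
--             lines = [line] # start new sequence
--         elif not filterBlankLines: # a blank or non-blank line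
--             lines.append(line) # add to current sequence
--         elif line.strip(): # a non-blank line
--             lines.append(line) # add to current sequence
--     if lines:
--         yield lines # yield current sequence
-- ===== SOURCE B (Python) =====
-- def _splitOnNamelines(filehandle, filterBlankLines=False):
--     # Two-pointer span scan: filter blanks first, then cut the list at namelines.
--     lines = [l for l in filehandle if not filterBlankLines or l.strip()]
--     i, n = 0, len(lines)
--     while i < n:
--         j = i + 1
--         while j < n and not lines[j].startswith('>'):
--             j += 1
--         yield lines[i:j]
--         i = j
-- ===== Notes on version B (the rewrite author's own statement) =====
-- stated objective: simpler
-- what changed: A threads a current-group accumulator with yield-on-nameline bookkeeping through one stateful loop; B filters blank lines up front and then slices the list into spans with a two-pointer scan that advances to the next nameline, yielding each slice.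
import Mathlib
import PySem

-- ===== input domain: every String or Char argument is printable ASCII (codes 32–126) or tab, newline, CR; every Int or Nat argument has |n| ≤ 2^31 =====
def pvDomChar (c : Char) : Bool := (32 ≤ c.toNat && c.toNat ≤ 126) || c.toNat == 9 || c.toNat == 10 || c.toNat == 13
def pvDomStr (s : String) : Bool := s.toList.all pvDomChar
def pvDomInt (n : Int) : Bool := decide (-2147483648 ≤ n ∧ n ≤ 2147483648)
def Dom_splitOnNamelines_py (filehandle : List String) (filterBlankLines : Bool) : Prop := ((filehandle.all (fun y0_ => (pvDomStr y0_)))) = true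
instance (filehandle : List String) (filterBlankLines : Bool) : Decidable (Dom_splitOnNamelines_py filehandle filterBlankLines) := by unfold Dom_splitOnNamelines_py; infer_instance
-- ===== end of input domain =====

-- B replaces A's stateful accumulate-and-yield loop by a blank-line filter followed by a span scan
-- that cuts the line list at namelines (objective: simpler decomposition, same cost).
-- Both versions are generators in Python; the ports compare the full list of yielded groups.


-- ===== PORT A =====
-- `line and line[0] == '>'`
def pvNameA (line : String) : Bool := (line != "") && (PySem.Str.pyGet? line 0 == some '>')

-- body of A's `for line in filehandle`; state = (groups yielded so far, current `lines`)
def pvStepA (filterBlankLines : Bool) (st : List (List String) × List String) (line : String) :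
    List (List String) × List String :=
  if pvNameA line then
    (if st.2 = [] then st.1 else st.1 ++ [st.2], [line])
  else if !filterBlankLines then
    (st.1, st.2 ++ [line])
  else if PySem.Str.strip line != "" then
    (st.1, st.2 ++ [line])
  else st

def splitOnNamelines_py (filehandle : List String) (filterBlankLines : Bool) : List (List String) :=
  let st := filehandle.foldl (pvStepA filterBlankLines) ([], [])
  if st.2 = [] then st.1 else st.1 ++ [st.2]

-- ===== PORT B =====
-- `lines[j].startswith('>')`
def pvNameB (line : String) : Bool := PySem.Str.startswith line ">"

-- B's outer `while i < n` loop: each step yields one slice lines[i:j];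
-- the inner `while` that advances j over non-namelines is the takeWhile/dropWhile split
def pvGoB : List String → List (List String)
  | [] => []
  | l :: rest =>
      (l :: rest.takeWhile (fun x => !pvNameB x)) :: pvGoB (rest.dropWhile (fun x => !pvNameB x))
  termination_by ls => ls.length
  decreasing_by
    simpa using Nat.lt_succ_of_le (List.length_dropWhile_le (fun x => !pvNameB x) rest)

def splitOnNamelines_py_alt (filehandle : List String) (filterBlankLines : Bool) : List (List String) :=
  pvGoB (filehandle.filter (fun l => !filterBlankLines || PySem.Str.strip l != ""))

-- ===== PRECONDITION & SPEC =====
def Spec_splitOnNamelines_py (filehandle : List String) (filterBlankLines : Bool) (out : List (List String)) : Prop := out = splitOnNamelines_py_alt filehandle filterBlankLines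
instance (filehandle : List String) (filterBlankLines : Bool) (out : List (List String)) : Decidable (Spec_splitOnNamelines_py filehandle filterBlankLines out) := by unfold Spec_splitOnNamelines_py; infer_instance

-- ===== CLAIM (what is proved, stated in full; the proofs are below) =====
def Claim_equal_splitOnNamelines_py : Prop := ∀ (filehandle : List String) (filterBlankLines : Bool), Dom_splitOnNamelines_py filehandle filterBlankLines → Spec_splitOnNamelines_py filehandle filterBlankLines (splitOnNamelines_py filehandle filterBlankLines)

-- ===== LEMMAS AND PROOFS =====

theorem pv_toList_eq_nil (l : String) : (l = "") ↔ l.toList = [] := by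
  constructor
  · intro h; simp [h]
  · intro h; have := congrArg String.ofList h; simpa using this

-- A's nameline test and B's startswith test agree
theorem pvNameA_eq_pvNameB : pvNameA = pvNameB := by
  funext l
  simp only [pvNameA, pvNameB, PySem.Str.pyGet?, PySem.Str.startswith, PySem.Chars.startswith,
    PySem.Chars.pyGet?]
  have h : (l != "") = !l.toList.isEmpty := by
    rcases hl : l.toList with _ | ⟨c, t⟩
    · simp [(pv_toList_eq_nil l).2 hl]
    · have : l ≠ "" := by intro h0; rw [(pv_toList_eq_nil l).1 h0] at hl; cases hl
      simp [this]
  rw [h]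
  have h2 : (">" : String).toList = ['>'] := by decide
  rw [h2]
  rcases hl : l.toList with _ | ⟨c, t⟩
  · simp [PySem.List.pyGet?]
  · simp [PySem.List.pyGet?, PySem.List.pyIdx?, List.isPrefixOf]
    exact eq_comm

theorem pv_dropWhile_snoc_ne {p : Char → Bool} (x : Char) (hx : p x = false) :
    ∀ xs : List Char, List.dropWhile p (xs ++ [x]) ≠ [] := by
  intro xs
  induction xs with
  | nil => simp [hx]
  | cons a t ih =>
    simp only [List.cons_append, List.dropWhile]
    cases p a <;> simp_all

-- a nameline is never blank: its first character '>' is not whitespace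
theorem pvName_not_blank (l : String) (h : pvNameB l = true) : (PySem.Str.strip l != "") = true := by
  simp only [pvNameB, PySem.Str.startswith, PySem.Chars.startswith] at h
  have h2 : (">" : String).toList = ['>'] := by decide
  rw [h2] at h
  rcases hl : l.toList with _ | ⟨c, t⟩
  · rw [hl] at h; simp [List.isPrefixOf] at h
  · rw [hl] at h
    simp [List.isPrefixOf] at h
    simp only [PySem.Str.strip, PySem.Chars.strip, PySem.Chars.lstrip, PySem.Chars.rstrip, hl]
    have hsp : PySem.Chars.isspace c = false := by rw [← h]; decide
    have hdw : List.dropWhile PySem.Chars.isspace (c :: t) = c :: t := by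
      simp [List.dropWhile, hsp]
    rw [hdw]
    have : (List.dropWhile PySem.Chars.isspace (c :: t).reverse) ≠ [] := by
      have := pv_dropWhile_snoc_ne c hsp t.reverse
      simpa using this
    rcases hr : List.dropWhile PySem.Chars.isspace (c :: t).reverse with _ | ⟨a, b⟩
    · exact absurd hr this
    · simp only [bne_iff_ne, ne_eq]
      intro hcon
      have := (pv_toList_eq_nil _).1 hcon
      simp at this

-- with filterBlankLines, A's loop over the raw lines is A's plain loop over the filtered lines
theorem pvFoldA_filter (ls : List String) (st : List (List String) × List String) :
    ls.foldl (pvStepA true) st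
      = (ls.filter (fun l => PySem.Str.strip l != "")).foldl (pvStepA false) st := by
  induction ls generalizing st with
  | nil => rfl
  | cons l t ih =>
    by_cases hk : (PySem.Str.strip l != "") = true
    · rw [List.foldl_cons, List.filter_cons, if_pos hk, List.foldl_cons, ih]
      congr 1
      simp only [pvStepA, hk]
      split
      · rfl
      · simp
    · have hnb : pvNameA l = false := by
        rw [pvNameA_eq_pvNameB]
        cases hb : pvNameB l
        · rfl
        · exact absurd (pvName_not_blank l hb) hk
      rw [List.foldl_cons, List.filter_cons, if_neg hk]
      rw [show pvStepA true st l = st by simp [pvStepA, hnb, hk]]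
      exact ih st

-- the pending-group view of B's scan
def pvFin : List String → List String → List (List String)
  | [], cur => if cur = [] then [] else [cur]
  | l :: ls, cur =>
      if pvNameB l then (if cur = [] then [] else [cur]) ++ pvFin ls [l]
      else pvFin ls (cur ++ [l])

theorem pvFin_eq_go (ls : List String) (cur : List String) (h : cur ≠ []) :
    pvFin ls cur
      = (cur ++ ls.takeWhile (fun x => !pvNameB x)) :: pvGoB (ls.dropWhile (fun x => !pvNameB x)) := by
  induction ls generalizing cur with
  | nil => simp [pvFin, pvGoB, h]
  | cons l t ih =>
    cases hb : pvNameB l with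
    | true =>
      simp only [pvFin, hb, if_true, if_neg h, List.takeWhile_cons, List.dropWhile_cons,
        Bool.not_true]
      rw [ih [l] (by simp)]
      simp [pvGoB]
    | false =>
      simp only [pvFin, hb, Bool.false_eq_true, if_false, List.takeWhile_cons,
        List.dropWhile_cons, Bool.not_false, if_true]
      rw [ih (cur ++ [l]) (by simp)]
      simp

-- A's loop with a pending group, finalized, is pvFin
theorem pvFoldA_eq_fin (ls : List String) (acc : List (List String)) (cur : List String) :
    (let st := ls.foldl (pvStepA false) (acc, cur);
     if st.2 = [] then st.1 else st.1 ++ [st.2]) = acc ++ pvFin ls cur := by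
  induction ls generalizing acc cur with
  | nil => simp only [List.foldl_nil, pvFin]; split <;> simp_all
  | cons l t ih =>
    simp only [List.foldl_cons, pvStepA, pvNameA_eq_pvNameB, Bool.not_false, if_true]
    cases hb : pvNameB l with
    | true =>
      simp only [hb, if_true]
      rw [ih]
      simp only [pvFin, hb, if_true]
      by_cases hc : cur = [] <;> simp [hc]
    | false =>
      simp only [hb, Bool.false_eq_true, if_false]
      rw [ih]
      simp [pvFin, hb]

theorem pvFin_nil_eq_go (ls : List String) : pvFin ls [] = pvGoB ls := by
  cases ls with
  | nil => simp [pvFin, pvGoB]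
  | cons l t =>
    rw [pvGoB]
    simp only [pvFin]
    split <;> simpa using pvFin_eq_go t [l] (by simp)

-- ===== VERDICT (by name: the statement is the Claim_ definition above) =====
theorem splitOnNamelines_py_spec : Claim_equal_splitOnNamelines_py := by
  intro fh fbl _
  show splitOnNamelines_py fh fbl = splitOnNamelines_py_alt fh fbl
  unfold splitOnNamelines_py splitOnNamelines_py_alt
  cases fbl with
  | false =>
    rw [pvFoldA_eq_fin fh [] [], pvFin_nil_eq_go]
    simp
  | true =>
    rw [pvFoldA_filter]
    rw [pvFoldA_eq_fin _ [] [], pvFin_nil_eq_go]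
    simp
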